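-- pv_equiv track=rewrite | github.com/AndreiToroplean/loopover | loopover_puzzle.py | _modular_median
-- ===== SOURCE A (Python) =====
-- def _modular_median(values, mod):
--     """Return the modular median. """
--     if len(values) == 0:
--         return 0
--
--     pot_medians_shifts = []
--     for pot_median in values:
--         tot_shift = 0
--         for value in values:
--             tot_shift += abs(_smallest_shift(value - pot_median, mod))
--
--         pot_medians_shifts.append((pot_median, tot_shift))
--
--     return min(pot_medians_shifts, key=lambda x: x[1])[0]
--
-- def _smallest_shift(shift, mod):
--     """Return the equivalent shift with the smallest absolute value. """
--     return (shift + (mod // 2)) % mod - mod // 2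
-- ===== SOURCE B (Python) =====
-- def _modular_median(values, mod):
--     """Return the modular median. """
--     if not values:
--         return 0
--
--     half = mod // 2
--     counts = {}
--     for value in values:
--         r = (value + half) % mod
--         counts[r] = counts.get(r, 0) + 1
--
--     def cost(pot_median):
--         return sum(cnt * abs((r - pot_median) % mod - half) for r, cnt in counts.items())
--
--     return min(values, key=cost)
-- ===== Notes on version B (the rewrite author's own statement) =====
-- stated objective: faster
-- what changed: B replaces A's nested rescan of all values with a residue counter built once: each value is reduced to its shifted residue class mod `mod` in a dict of counts, and each candidate's total shift is computed from the distinct residues (at most min(n,|mod|) of them) instead of rescanning all n values; the pair-list + min-by-second-component is replaced by min(values, key=cost).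
import Mathlib
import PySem

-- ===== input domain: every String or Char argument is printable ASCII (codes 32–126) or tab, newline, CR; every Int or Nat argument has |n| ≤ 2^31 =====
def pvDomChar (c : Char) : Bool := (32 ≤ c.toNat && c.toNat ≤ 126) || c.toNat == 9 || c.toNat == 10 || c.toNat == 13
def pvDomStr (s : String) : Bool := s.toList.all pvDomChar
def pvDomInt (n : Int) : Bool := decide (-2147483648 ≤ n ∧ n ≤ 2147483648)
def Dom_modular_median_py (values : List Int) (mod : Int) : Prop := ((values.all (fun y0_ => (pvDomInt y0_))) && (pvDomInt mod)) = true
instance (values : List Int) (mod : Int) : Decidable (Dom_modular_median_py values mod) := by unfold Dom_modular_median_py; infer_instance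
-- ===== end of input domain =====

-- B replaces A's inner rescan of all values with a residue counter built once;
-- equivalence of return values is proved on Pre_ (A raises ZeroDivisionError for mod = 0 on nonempty input).

-- ===== PORT A =====
-- _smallest_shift(shift, mod) = (shift + mod//2) % mod - mod//2
def pvSmallestShift (shift m : Int) : Int :=
  PySem.Int.mod (shift + PySem.Int.floordiv m 2) m - PySem.Int.floordiv m 2

def modular_median_py (values : List Int) (mod : Int) : Int :=
  if values.length = 0 then 0
  else
    -- pot_medians_shifts: for pot_median in values, append (pot_median, tot_shift)
    let pms : List (Int × Int) := values.foldl (fun acc pm =>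
      acc ++ [(pm, values.foldl (fun t v => t + |pvSmallestShift (v - pm) mod|) 0)]) []
    -- min(pot_medians_shifts, key=lambda x: x[1])[0]; pms is nonempty here
    match PySem.List.min? pms (fun x => x.2) with
    | some p => p.1
    | none => 0

-- ===== PORT B =====
def modular_median_py_alt (values : List Int) (mod : Int) : Int :=
  if values = [] then 0
  else
    let half := PySem.Int.floordiv mod 2
    let counts : PySem.Dict Int Int := values.foldl (fun d v =>
      let r := PySem.Int.mod (v + half) mod
      d.insert r (d.getD r 0 + 1)) PySem.Dict.empty
    let cost := fun (pm : Int) =>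
      (counts.items.map (fun rc => rc.2 * |PySem.Int.mod (rc.1 - pm) mod - half|)).sum
    -- min(values, key=cost); values is nonempty here
    match PySem.List.min? values cost with
    | some m => m
    | none => 0

-- ===== PRECONDITION & SPEC =====
-- Pre_ excludes only mod = 0 with nonempty values, where the Python A (and B) raise ZeroDivisionError.
def Pre_modular_median_py (values : List Int) (mod : Int) : Prop := values = [] ∨ mod ≠ 0
instance (values : List Int) (mod : Int) : Decidable (Pre_modular_median_py values mod) := by
  unfold Pre_modular_median_py; infer_instance

def pvWitness_modular_median_py : List Int × Int := ([1, 4, 4, 0], 5)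

def Spec_modular_median_py (values : List Int) (mod : Int) (out : Int) : Prop := out = modular_median_py_alt values mod
instance (values : List Int) (mod : Int) (out : Int) : Decidable (Spec_modular_median_py values mod out) := by unfold Spec_modular_median_py; infer_instance

-- ===== CLAIM (what is proved, stated in full; the proofs are below) =====
def Claim_equal_modular_median_py : Prop := ∀ (values : List Int) (mod : Int), Dom_modular_median_py values mod → Pre_modular_median_py values mod → Spec_modular_median_py values mod (modular_median_py values mod)

-- ===== LEMMAS AND PROOFS =====

-- fmod only depends on the residue class of its first argument
lemma pv_fmod_congr (a b m : Int) (h : a % m = b % m) : a.fmod m = b.fmod m := by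
  have hd : (m ∣ a) ↔ (m ∣ b) := by
    rw [Int.dvd_iff_emod_eq_zero, Int.dvd_iff_emod_eq_zero, h]
  rw [Int.fmod_eq_emod, Int.fmod_eq_emod, h]
  by_cases h0 : 0 ≤ m ∨ m ∣ a
  · rw [if_pos h0, if_pos (by tauto)]
  · rw [if_neg h0, if_neg (by tauto)]

-- pointwise: |_smallest_shift(v - pm, mod)| computed from the shifted residue of v
lemma pv_pointwise (v pm m : Int) :
    |pvSmallestShift (v - pm) m| =
      |PySem.Int.mod (PySem.Int.mod (v + PySem.Int.floordiv m 2) m - pm) m - PySem.Int.floordiv m 2| := by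
  unfold pvSmallestShift PySem.Int.mod PySem.Int.floordiv
  congr 2
  apply pv_fmod_congr
  have hx : (v + Int.fdiv m 2).fmod m % m = (v + Int.fdiv m 2) % m := by
    rw [Int.fmod_eq_emod]
    by_cases h0 : 0 ≤ m ∨ m ∣ v + Int.fdiv m 2
    · rw [if_pos h0]; simp
    · rw [if_neg h0]
      have h1 := Int.add_mul_emod_self_left (a := (v + Int.fdiv m 2) % m) (b := m) (c := 1)
      have h2 := Int.emod_emod_of_dvd (v + Int.fdiv m 2) (dvd_refl m)
      simpa [h2] using h1
  calc (v - pm + Int.fdiv m 2) % m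
      = ((v + Int.fdiv m 2) % m - pm % m) % m := by
        rw [← Int.sub_emod]; ring_nf
    _ = ((v + Int.fdiv m 2).fmod m % m - pm % m) % m := by rw [hx]
    _ = ((v + Int.fdiv m 2).fmod m - pm) % m := by rw [← Int.sub_emod]

-- a contained key is found, with its key literally equal to the probe
lemma pv_find_of_any (l : List (Int × Int)) (r : Int)
    (hc : l.any (fun p => p.1 == r) = true) :
    ∃ w, l.find? (fun p => p.1 == r) = some (r, w) := by
  induction l with
  | nil => simp at hc
  | cons p t ih =>
    by_cases hp : (p.1 == r) = true
    · refine ⟨p.2, ?_⟩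
      have hcons : List.find? (fun p => p.1 == r) (p :: t) = some p := by simp [hp]
      rw [hcons]
      have : p.1 = r := by simpa using hp
      obtain ⟨a, b⟩ := p
      simp_all
    · simp only [List.any_cons, hp, Bool.false_or] at hc
      obtain ⟨w, hw⟩ := ih hc
      have hcons : List.find? (fun p => p.1 == r) (p :: t) = List.find? (fun p => p.1 == r) t := by
        simp [hp]
      exact ⟨w, by rw [hcons]; exact hw⟩

lemma pv_not_any_not_mem (l : List (Int × Int)) (r : Int)
    (h : l.any (fun p => p.1 == r) = false) : r ∉ l.map Prod.fst := by
  rw [List.any_eq_false] at h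
  intro hm
  obtain ⟨p, hp, hfst⟩ := List.mem_map.mp hm
  have hbeq : (p.1 == r) = true := by simp [hfst]
  exact absurd hbeq (h p hp)

-- replacing the unique entry (r, w) by (r, w+1) adds h r to the weighted sum
lemma pv_map_replace_sum (l : List (Int × Int)) (r w : Int) (h : Int → Int)
    (hnd : (l.map Prod.fst).Nodup)
    (hfind : l.find? (fun p => p.1 == r) = some (r, w)) :
    ((l.map (fun p => if p.1 == r then (r, w + 1) else p)).map (fun rc => rc.2 * h rc.1)).sum =
      (l.map (fun rc => rc.2 * h rc.1)).sum + h r := by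
  induction l with
  | nil => simp at hfind
  | cons p t ih =>
    by_cases hp : (p.1 == r) = true
    · have hpw : p = (r, w) := by
        have hcons : List.find? (fun p => p.1 == r) (p :: t) = some p := by simp [hp]
        have := hfind
        rw [hcons] at this
        injection this
      have hnt : r ∉ t.map Prod.fst := by
        simp only [List.map_cons, List.nodup_cons] at hnd
        simpa [hpw] using hnd.1
      have ht : t.map (fun q => if q.1 == r then (r, w + 1) else q) = t := by
        calc t.map (fun q => if q.1 == r then (r, w + 1) else q) = t.map id := by
              apply List.map_congr_left
              intro q hq
              have hq' : ¬ (q.1 == r) = true := fun hb =>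
                hnt (List.mem_map.mpr ⟨q, hq, by simpa using hb⟩)
              simp [hq']
          _ = t := List.map_id t
      subst hpw
      have hrr : (((r, w) : Int × Int).1 == r) = true := by simp
      simp only [List.map_cons, List.sum_cons, ht, if_pos hrr]
      ring
    · have hnd' : (t.map Prod.fst).Nodup := by
        simp only [List.map_cons, List.nodup_cons] at hnd; exact hnd.2
      have hfind' : t.find? (fun p => p.1 == r) = some (r, w) := by
        have hcons : List.find? (fun p => p.1 == r) (p :: t) = List.find? (fun p => p.1 == r) t := by
          simp [hp]
        rw [hcons] at hfind; exact hfind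
      simp only [List.map_cons, if_neg hp, List.sum_cons, ih hnd' hfind']
      ring

-- keys of an association list after an insert
lemma pv_keys_insert (d : PySem.Dict Int Int) (r v : Int) :
    (d.insert r v).items.map Prod.fst =
      if d.contains r then d.items.map Prod.fst else d.items.map Prod.fst ++ [r] := by
  unfold PySem.Dict.insert
  by_cases hc : d.contains r = true
  · rw [if_pos hc, if_pos hc]
    simp only [PySem.Dict.items, List.map_map]
    apply List.map_congr_left
    intro p _
    by_cases hp : (p.1 == r) = true
    · have hpr : p.1 = r := by simpa using hp
      simp [Function.comp, hp, hpr]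
    · simp [Function.comp, hp]
  · rw [if_neg hc, if_neg hc]
    simp

lemma pv_nodup_insert (d : PySem.Dict Int Int) (r v : Int)
    (h : (d.items.map Prod.fst).Nodup) : ((d.insert r v).items.map Prod.fst).Nodup := by
  rw [pv_keys_insert]
  by_cases hc : d.contains r = true
  · simpa [hc] using h
  · rw [if_neg hc]
    rw [List.nodup_append]
    refine ⟨h, List.nodup_singleton r, ?_⟩
    intro a ha b hb
    have hb' : b = r := by simpa using hb
    subst hb'
    intro hab
    subst hab
    exact pv_not_any_not_mem d.items a
      (by unfold PySem.Dict.contains at hc; simpa only [Bool.not_eq_true] using hc) ha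

-- one counting insert adds h r to the weighted sum over the items
lemma pv_sum_insert (d : PySem.Dict Int Int) (r : Int) (h : Int → Int)
    (hnd : (d.items.map Prod.fst).Nodup) :
    (((d.insert r (d.getD r 0 + 1)).items).map (fun rc => rc.2 * h rc.1)).sum =
      ((d.items).map (fun rc => rc.2 * h rc.1)).sum + h r := by
  by_cases hc : d.contains r = true
  · obtain ⟨w, hfind⟩ := pv_find_of_any d.items r (by unfold PySem.Dict.contains at hc; exact hc)
    have hgd : d.getD r 0 = w := by
      unfold PySem.Dict.getD PySem.Dict.get?
      rw [hfind]
      rfl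
    unfold PySem.Dict.insert
    rw [if_pos hc, hgd]
    simpa [PySem.Dict.items] using pv_map_replace_sum d.items r w h hnd hfind
  · have hfind : d.items.find? (fun p => p.1 == r) = none := by
      rw [List.find?_eq_none]
      intro p hp
      unfold PySem.Dict.contains at hc
      simp only [Bool.not_eq_true, List.any_eq_false] at hc
      simpa using hc p hp
    have hgd : d.getD r 0 = 0 := by
      unfold PySem.Dict.getD PySem.Dict.get?
      rw [hfind]
      rfl
    unfold PySem.Dict.insert
    rw [if_neg hc, hgd]
    simp

-- the counter fold: weighted item sum = plain sum of h over the keys fed in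
lemma pv_counter_sum (l : List Int) (keyf : Int → Int) (h : Int → Int)
    (d : PySem.Dict Int Int) (hnd : (d.items.map Prod.fst).Nodup) :
    (((l.foldl (fun d v => d.insert (keyf v) (d.getD (keyf v) 0 + 1)) d).items).map
        (fun rc => rc.2 * h rc.1)).sum =
      ((d.items).map (fun rc => rc.2 * h rc.1)).sum + (l.map (fun v => h (keyf v))).sum := by
  induction l generalizing d with
  | nil => simp
  | cons v t ih =>
    simp only [List.foldl_cons, List.map_cons, List.sum_cons]
    rw [ih _ (pv_nodup_insert _ _ _ hnd), pv_sum_insert _ _ _ hnd]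
    ring

-- min-by over a (c, F c) pairing equals min-by F, mapped
lemma pv_min_pair_fold (l : List Int) (F : Int → Int) (acc : Option Int) :
    (l.map (fun c => (c, F c))).foldl
        (fun acc x => match acc with
          | none => some x
          | some m => if x.2 < m.2 then some x else some m)
        (Option.map (fun c => (c, F c)) acc) =
      Option.map (fun c => (c, F c))
        (l.foldl (fun acc x => match acc with
          | none => some x
          | some m => if F x < F m then some x else some m) acc) := by
  induction l generalizing acc with
  | nil => rfl
  | cons c t ih =>
    simp only [List.map_cons, List.foldl_cons]
    cases acc with
    | none => exact ih (some c)
    | some m =>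
      simp only [Option.map_some]
      by_cases hlt : F c < F m
      · simpa [hlt] using ih (some c)
      · simpa [hlt] using ih (some m)

lemma pv_min_pair (l : List Int) (F : Int → Int) :
    PySem.List.min? (l.map (fun c => (c, F c))) (fun x => x.2) =
      Option.map (fun c => (c, F c)) (PySem.List.min? l F) := by
  unfold PySem.List.min?
  have h := pv_min_pair_fold l F none
  convert h using 2
  · funext acc x; cases acc <;> rfl
  · congr 1; funext acc x; cases acc <;> rfl

-- ===== VERDICT (by name: the statement is the Claim_ definition above) =====
theorem modular_median_py_spec : Claim_equal_modular_median_py := by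
  intro values mod _ _
  unfold Spec_modular_median_py modular_median_py modular_median_py_alt
  by_cases hv : values = []
  · simp [hv]
  · have hlen : ¬ values.length = 0 := by simpa [List.length_eq_zero_iff] using hv
    simp only [hlen, if_false, if_neg hv]
    set half := PySem.Int.floordiv mod 2 with hhalf
    set counts : PySem.Dict Int Int := values.foldl (fun d v =>
      d.insert (PySem.Int.mod (v + half) mod) (d.getD (PySem.Int.mod (v + half) mod) 0 + 1))
      PySem.Dict.empty with hcounts
    set FB := fun (pm : Int) =>
      ((counts.items).map (fun rc => rc.2 * |PySem.Int.mod (rc.1 - pm) mod - half|)).sum with hFB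
    set FA := fun (pm : Int) =>
      values.foldl (fun t v => t + |pvSmallestShift (v - pm) mod|) 0 with hFA
    have hF : FA = FB := by
      funext pm
      rw [hFA, hFB]
      simp only
      rw [PySem.List.foldl_add]
      rw [hcounts, pv_counter_sum values (fun v => PySem.Int.mod (v + half) mod)
            (fun r => |PySem.Int.mod (r - pm) mod - half|)
            PySem.Dict.empty (by simp [PySem.Dict.empty])]
      simp only [PySem.Dict.empty, List.map_nil, List.sum_nil, zero_add]
      congr 1
      apply List.map_congr_left
      intro v _
      exact pv_pointwise v pm mod
    have hpms : values.foldl (fun acc pm =>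
        acc ++ [(pm, values.foldl (fun t v => t + |pvSmallestShift (v - pm) mod|) 0)]) [] =
        values.map (fun pm => (pm, FA pm)) := by
      simpa using PySem.List.foldl_append_singleton_eq_map
        (fun pm => (pm, values.foldl (fun t v => t + |pvSmallestShift (v - pm) mod|) 0)) values []
    rw [hpms, pv_min_pair values FA, hF]
    cases hmin : PySem.List.min? values FB with
    | none => rw [PySem.List.min?_eq_none_iff] at hmin; exact absurd hmin hv
    | some m => simp
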